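-- pv_equiv track=rewrite | github.com/wzygxr/shuati | class055_DynamicProgramming/dp_fusion.py | pruning_memoization_search
-- ===== SOURCE A (Python) =====
-- def pruning_memoization_search(grid):
--     """
--     剪枝优化的记忆化搜索：LeetCode 1301. 最大得分的路径数目
--     题目链接：https://leetcode-cn.com/problems/number-of-paths-with-max-score/
--
--     问题描述：
--     给你一个正方形字符数组 board ，你从数组的 左上角 开始出发。
--     每一步可以移动到四个方向之一，但不能越出边界，也不能移动到 'X' 上。
--     到达右下角时，你的路径得分是路径上所有数字的总和。
--     返回一个列表，其中第一个元素是最大可能的得分，第二个元素是得到最大得分的路径数目。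
--     路径数目需要对 10^9 + 7 取模。
--
--     解题思路：
--     使用记忆化搜索，同时缓存最大得分和对应的路径数目，进行剪枝优化。
--
--     Args:
--         grid: 字符数组
--
--     Returns:
--         list: [最大得分, 路径数目]
--
--     时间复杂度：O(n^2)
--     空间复杂度：O(n^2)
--     """
--     if not grid or not grid[0]:
--         return [0, 0]
--
--     n = len(grid)
--     mod = 10**9 + 7
--
--     # 缓存结果：(max_score, path_count)
--     memo = {}
--
--     def dfs(i, j):
--         if (i, j) in memo:
--             return memo[(i, j)]
--
--         # 到达终点
--         if i == 0 and j == 0: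
--             return [0, 1] if grid[i][j] == 'E' or grid[i][j] == 'S' else [int(grid[i][j]), 1]
--
--         # 越界或遇到障碍
--         if i < 0 or j < 0 or grid[i][j] == 'X':
--             return [-1, 0]  # -1表示不可达
--
--         max_score = -1
--         path_count = 0
--
--         # 尝试从上方和左方过来
--         for di, dj in [(-1, 0), (0, -1)]:
--             ni, nj = i + di, j + dj
--             score, count = dfs(ni, nj)
--
--             if score == -1:
--                 continue
--
--             current_score = score + (int(grid[i][j]) if grid[i][j] not in ['S', 'E'] else 0)
--
--             if current_score > max_score:
--                 max_score = current_score
--                 path_count = count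
--             elif current_score == max_score:
--                 path_count = (path_count + count) % mod
--
--         memo[(i, j)] = [max_score, path_count]
--         return [max_score, path_count]
--
--     # 从右下角开始搜索
--     # 注意：根据题目描述，需要调整起点和终点的位置
--     score, count = dfs(n-1, n-1)
--     return [score, count] if score != -1 else [0, 0]
-- ===== SOURCE B (Python) =====
-- def pruning_memoization_search(grid):
--     """Bottom-up tabulation (rolling row) instead of memoized recursion."""
--     if not grid or not grid[0]:
--         return [0, 0]
--     n = len(grid)
--     mod = 10 ** 9 + 7
--     prev = []
--     for i in range(n):
--         cur = []
--         for j in range(n):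
--             cell = grid[i][j]
--             if i == 0 and j == 0:
--                 cur.append((0, 1) if cell in ('S', 'E') else (int(cell), 1))
--             elif cell == 'X':
--                 cur.append((-1, 0))
--             else:
--                 val = 0 if cell in ('S', 'E') else int(cell)
--                 best, cnt = -1, 0
--                 up = prev[j] if i > 0 else (-1, 0)
--                 left = cur[j - 1] if j > 0 else (-1, 0)
--                 for s, c in (up, left):
--                     if s == -1:
--                         continue
--                     t = s + val
--                     if t > best:
--                         best, cnt = t, c
--                     elif t == best:
--                         cnt = (cnt + c) % mod
--                 cur.append((best, cnt))
--         prev = cur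
--     s, c = prev[n - 1]
--     return [s, c] if s != -1 else [0, 0]
-- ===== Notes on version B (the rewrite author's own statement) =====
-- stated objective: alternative
-- what changed: Replaced the top-down memoized recursion over (i,j) with an iterative bottom-up tabulation that fills a rolling row of (max_score, path_count) pairs in increasing i then j, merging the up and left entries per cell.
-- outside the precondition, e.g. on pruning_memoization_search([['X', 'X'], ['X', '1']]): A returns [0, 0], B raises ValueError; on pruning_memoization_search([['1'], ['2', 'X']]): A returns [0, 0], B raises IndexError; on pruning_memoization_search([['zz', 'X'], ['X', '1']]): A returns [0, 0], B raises ValueError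
import Mathlib
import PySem

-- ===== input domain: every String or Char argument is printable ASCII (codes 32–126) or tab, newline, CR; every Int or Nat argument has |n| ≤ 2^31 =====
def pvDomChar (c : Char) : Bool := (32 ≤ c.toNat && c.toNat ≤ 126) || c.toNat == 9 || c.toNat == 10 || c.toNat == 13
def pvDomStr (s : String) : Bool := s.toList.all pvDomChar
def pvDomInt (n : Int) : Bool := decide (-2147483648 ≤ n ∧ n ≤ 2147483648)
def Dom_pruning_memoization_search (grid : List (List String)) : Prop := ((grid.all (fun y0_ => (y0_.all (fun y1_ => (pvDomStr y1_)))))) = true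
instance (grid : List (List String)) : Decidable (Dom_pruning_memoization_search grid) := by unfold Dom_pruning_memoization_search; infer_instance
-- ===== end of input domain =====

-- B replaces A's top-down memoized recursion by bottom-up rolling-row tabulation (alternative
-- decomposition, same O(n^2) cost). Equivalence is about the return value on Pre_.

-- ===== PORT A =====
-- grid[i][j]; out-of-range reads give "" / int() failures give 0 — exactly those inputs are excluded by Pre_.
def pvCellA (grid : List (List String)) (i j : Int) : String :=
  (PySem.List.pyGet? ((PySem.List.pyGet? grid i).getD []) j).getD ""

-- int(s); Pre_ guarantees the parse succeeds wherever Python A evaluates it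
def pvInt (s : String) : Int := (PySem.Int.ofStr? s).getD 0

-- one iteration of A's 'for di, dj in [(-1,0),(0,-1)]' body, state (max_score, path_count), sc = dfs(ni,nj)
def pvStepA (grid : List (List String)) (i j : Int) (st : Int × Int) (sc : Int × Int) : Int × Int :=
  if sc.1 = -1 then st
  else
    let cur := sc.1 + (if ¬ (pvCellA grid i j = "S" ∨ pvCellA grid i j = "E") then pvInt (pvCellA grid i j) else 0)
    if cur > st.1 then (cur, sc.2)
    else if cur = st.1 then (st.1, (st.2 + sc.2) % (10 ^ 9 + 7))
    else st

-- A's dfs; the memo dict is a value-preserving cache of this pure recursion and is not modelled.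
-- The literal 2-element direction list is unrolled into its two iterations.
def pvDfsA (grid : List (List String)) (i j : Int) : Int × Int :=
  if i = 0 ∧ j = 0 then
    (if pvCellA grid i j = "E" ∨ pvCellA grid i j = "S" then ((0 : Int), (1 : Int)) else (pvInt (pvCellA grid i j), 1))
  else if i < 0 ∨ j < 0 ∨ pvCellA grid i j = "X" then (-1, 0)
  else
    pvStepA grid i j (pvStepA grid i j (-1, 0) (pvDfsA grid (i - 1) j)) (pvDfsA grid i (j - 1))
termination_by (i + j + 2).toNat
decreasing_by all_goals omega

def pruning_memoization_search (grid : List (List String)) : List Int :=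
  if grid = [] ∨ grid.headD [] = [] then [0, 0]
  else
    let n : Int := grid.length
    let r := pvDfsA grid (n - 1) (n - 1)
    if r.1 ≠ -1 then [r.1, r.2] else [0, 0]

-- ===== PORT B =====
def pvCellB (grid : List (List String)) (i j : Nat) : String := (grid.getD i []).getD j ""

-- Source B's int(cell); Pre_ guarantees the parse succeeds on every cell B evaluates
def pvIntB (s : String) : Int := (PySem.Int.ofStr? s).getD 0

def pvValB (s : String) : Int := if s = "S" ∨ s = "E" then 0 else pvIntB s

-- one iteration of Source B's 'for s, c in (up, left)' body
def pvMergeB (val : Int) (st : Int × Int) (cand : Int × Int) : Int × Int :=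
  if cand.1 = -1 then st
  else
    let t := cand.1 + val
    if t > st.1 then (t, cand.2)
    else if t = st.1 then (st.1, (st.2 + cand.2) % (10 ^ 9 + 7))
    else st

-- body of Source B's inner loop: the entry appended for cell (i, j), given the previous and current rows
def pvEntryB (grid : List (List String)) (i j : Nat) (prev cur : List (Int × Int)) : Int × Int :=
  let cell := pvCellB grid i j
  if i = 0 ∧ j = 0 then (if cell = "S" ∨ cell = "E" then ((0 : Int), (1 : Int)) else (pvIntB cell, 1))
  else if cell = "X" then (-1, 0)
  else
    let val := pvValB cell
    let up := if 0 < i then prev.getD j (-1, 0) else (-1, 0)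
    let lf := if 0 < j then cur.getD (j - 1) (-1, 0) else (-1, 0)
    pvMergeB val (pvMergeB val (-1, 0) up) lf

-- Source B's inner 'for j in range(n)' loop building row i
def pvRowB (grid : List (List String)) (n i : Nat) (prev : List (Int × Int)) : List (Int × Int) :=
  (List.range n).foldl (fun cur j => cur ++ [pvEntryB grid i j prev cur]) []

def pruning_memoization_search_alt (grid : List (List String)) : List Int :=
  if grid = [] ∨ grid.headD [] = [] then [0, 0]
  else
    let n := grid.length
    let last := (List.range n).foldl (fun prev i => pvRowB grid n i prev) []
    let r := last.getD (n - 1) (-1, 0)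
    if r.1 ≠ -1 then [r.1, r.2] else [0, 0]

-- ===== PRECONDITION & SPEC =====
-- Pre_ admits the empty-guard inputs and the grids the search cannot crash on: every row at least n
-- long, every cell of the leading n×n block 'S'/'E'/'X' or int-parseable, and the top-left cell not 'X'.
-- This also excludes some inputs A RETURNS on (see claim cites): grids whose crash-provoking cell
-- (short row, unparsable cell, or 'X' at (0,0)) is walled off by 'X' so A's search never touches it,
-- while B's eager tabulation would raise there; A's [0,0] on those is reachability-dependent accident.
def Pre_pruning_memoization_search (grid : List (List String)) : Prop :=
  grid = [] ∨ grid.headD [] = [] ∨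
    ((∀ row ∈ grid, grid.length ≤ row.length) ∧
     (∀ i < grid.length, ∀ j < grid.length,
        pvCellB grid i j = "S" ∨ pvCellB grid i j = "E" ∨ pvCellB grid i j = "X" ∨
          (PySem.Int.ofStr? (pvCellB grid i j)).isSome) ∧
     pvCellB grid 0 0 ≠ "X")
instance (grid : List (List String)) : Decidable (Pre_pruning_memoization_search grid) := by
  unfold Pre_pruning_memoization_search; infer_instance

def pvWitness_pruning_memoization_search : List (List String) := [["S", "2"], ["3", "E"]]

def Spec_pruning_memoization_search (grid : List (List String)) (out : List Int) : Prop := out = pruning_memoization_search_alt grid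
instance (grid : List (List String)) (out : List Int) : Decidable (Spec_pruning_memoization_search grid out) := by unfold Spec_pruning_memoization_search; infer_instance

-- ===== CLAIM (what is proved, stated in full; the proofs are below) =====
def Claim_equal_pruning_memoization_search : Prop := ∀ (grid : List (List String)), Dom_pruning_memoization_search grid → Pre_pruning_memoization_search grid → Spec_pruning_memoization_search grid (pruning_memoization_search grid)

theorem pvCell_eq (grid : List (List String)) (i j : Nat) :
    pvCellA grid (i : Int) (j : Int) = pvCellB grid i j := by
  simp [pvCellA, pvCellB, PySem.List.pyGet?_natCast, List.getD]

theorem pvDfsA_neg_left (grid : List (List String)) (j : Int) :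
    pvDfsA grid (-1) j = (-1, 0) := by
  rw [pvDfsA]; simp

theorem pvDfsA_neg_right (grid : List (List String)) (i : Int) :
    pvDfsA grid i (-1) = (-1, 0) := by
  rw [pvDfsA]; simp

theorem pvStepA_eq_mergeB (grid : List (List String)) (i j : Nat) (st sc : Int × Int) :
    pvStepA grid (i : Int) (j : Int) st sc = pvMergeB (pvValB (pvCellB grid i j)) st sc := by
  simp only [pvStepA, pvMergeB, pvValB, pvCell_eq, ite_not, pvInt, pvIntB]

theorem pvEntryB_eq_dfs (grid : List (List String)) (i j : Nat) (prev cur : List (Int × Int))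
    (hup : 0 < i → prev.getD j (-1, 0) = pvDfsA grid ((i : Int) - 1) j)
    (hlf : 0 < j → cur.getD (j - 1) (-1, 0) = pvDfsA grid (i : Int) ((j : Int) - 1)) :
    pvEntryB grid i j prev cur = pvDfsA grid (i : Int) (j : Int) := by
  rw [pvDfsA]
  by_cases hbase : i = 0 ∧ j = 0
  · obtain ⟨hi, hj⟩ := hbase; subst hi; subst hj
    have hc := pvCell_eq grid 0 0
    by_cases hS : pvCellB grid 0 0 = "S" <;> by_cases hE : pvCellB grid 0 0 = "E" <;>
      simp_all [pvEntryB, pvInt, pvIntB]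
  · have hbi : ¬((i : Int) = 0 ∧ (j : Int) = 0) := by
      intro ⟨a, b⟩; exact hbase ⟨by exact_mod_cast a, by exact_mod_cast b⟩
    rw [if_neg hbi]
    have hguard : ¬((i : Int) < 0 ∨ (j : Int) < 0 ∨ pvCellA grid i j = "X") ↔
        ¬(pvCellB grid i j = "X") := by
      simp [pvCell_eq]
    by_cases hX : pvCellB grid i j = "X"
    · rw [if_pos (by simp [pvCell_eq, hX])]
      simp [pvEntryB, hbase, hX]
    · rw [if_neg (hguard.mpr hX)]
      have hup' : (if 0 < i then prev.getD j (-1, 0) else (-1, 0)) = pvDfsA grid ((i : Int) - 1) j := by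
        rcases Nat.eq_zero_or_pos i with h | h
        · subst h; simpa using (pvDfsA_neg_left grid j).symm
        · rw [if_pos h]; exact hup h
      have hlf' : (if 0 < j then cur.getD (j - 1) (-1, 0) else (-1, 0)) = pvDfsA grid (i : Int) ((j : Int) - 1) := by
        rcases Nat.eq_zero_or_pos j with h | h
        · subst h; simpa using (pvDfsA_neg_right grid i).symm
        · rw [if_pos h]; exact hlf h
      simp only [pvEntryB, if_neg hbase, if_neg hX]
      rw [hup', hlf', pvStepA_eq_mergeB, pvStepA_eq_mergeB]
theorem pvRowB_partial (grid : List (List String)) (n i : Nat) (prev : List (Int × Int))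
    (hprev : 0 < i → ∀ j < n, prev.getD j (-1, 0) = pvDfsA grid ((i : Int) - 1) (j : Int)) :
    ∀ k, k ≤ n →
      ((List.range k).foldl (fun cur j => cur ++ [pvEntryB grid i j prev cur]) []).length = k ∧
      ∀ j < k, ((List.range k).foldl (fun cur j => cur ++ [pvEntryB grid i j prev cur]) []).getD j (-1, 0)
        = pvDfsA grid (i : Int) (j : Int) := by
  intro k
  induction k with
  | zero => simp
  | succ k ih =>
    intro hk
    obtain ⟨ihlen, ihget⟩ := ih (by omega)
    rw [List.range_succ, List.foldl_append]
    set C := (List.range k).foldl (fun cur j => cur ++ [pvEntryB grid i j prev cur]) [] with hC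
    simp only [List.foldl_cons, List.foldl_nil]
    have hent : pvEntryB grid i k prev C = pvDfsA grid (i : Int) (k : Int) := by
      apply pvEntryB_eq_dfs
      · intro hpos; exact hprev hpos k (by omega)
      · intro hpos
        have := ihget (k - 1) (by omega)
        have hcast : ((k - 1 : Nat) : Int) = (k : Int) - 1 := by omega
        rw [← hcast]
        rw [← this]
    constructor
    · simp [ihlen]
    · intro j hj
      rcases Nat.lt_or_ge j k with h | h
      · rw [List.getD_eq_getElem?_getD, List.getElem?_append_left (by omega),
            ← List.getD_eq_getElem?_getD, ihget j h]
      · have hjk : j = k := by omega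
        subst hjk
        rw [List.getD_eq_getElem?_getD, List.getElem?_append_right (by omega)]
        simp [ihlen, hent]

theorem pvTable_spec (grid : List (List String)) (n : Nat) :
    ∀ i ≤ n, ∀ j < n, ((List.range i).foldl (fun prev k => pvRowB grid n k prev) []).getD j (-1, 0)
      = if 0 < i then pvDfsA grid ((i : Int) - 1) (j : Int) else (-1, 0) := by
  intro i
  induction i with
  | zero => intro _ j hj; simp
  | succ i ih =>
    intro hi j hj
    rw [List.range_succ, List.foldl_append]
    simp only [List.foldl_cons, List.foldl_nil]
    have hrow := pvRowB_partial grid n i ((List.range i).foldl (fun prev k => pvRowB grid n k prev) [])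
      (fun hpos j' hj' => by rw [ih (by omega) j' hj', if_pos hpos]) n le_rfl
    rw [show pvRowB grid n i ((List.range i).foldl (fun prev k => pvRowB grid n k prev) [])
          = (List.range n).foldl (fun cur j => cur ++ [pvEntryB grid i j ((List.range i).foldl (fun prev k => pvRowB grid n k prev) []) cur]) [] from rfl]
    rw [hrow.2 j hj]
    simp

-- ===== VERDICT (by name: the statement is the Claim_ definition above) =====
theorem pruning_memoization_search_spec : Claim_equal_pruning_memoization_search := by
  intro grid _hdom _hpre
  unfold Spec_pruning_memoization_search
  unfold pruning_memoization_search pruning_memoization_search_alt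
  by_cases hempty : grid = [] ∨ grid.headD [] = []
  · rw [if_pos hempty, if_pos hempty]
  · simp only [if_neg hempty]
    have hn : 0 < grid.length := by
      rcases grid with _ | ⟨r, t⟩
      · exact absurd (Or.inl rfl) hempty
      · simp
    rw [pvTable_spec grid grid.length grid.length le_rfl (grid.length - 1) (by omega)]
    rw [if_pos hn]
    have hcast : ((grid.length - 1 : Nat) : Int) = (grid.length : Int) - 1 := by omega
    rw [hcast]
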